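-- pv_equiv track=rewrite | github.com/pjch/MITx-6.00.1-and-6.00.2 | 6.00.2-Problem Set 1-Part 1: Greedy Cow Transport.py | getShip
-- ===== SOURCE A (Python) =====
-- def getMax(cows, wl): #get the heaviest cow under available weight
--     current_max = ''
--     for name in cows:
--         if cows[name] <= wl:
--             if current_max == '' or cows[name] > cows[current_max]:
--                 current_max = name
--     return current_max
--
-- def getShip(cows, wl): #get the ship for one round
--     ship = []
--     while True:
--         maxaval = getMax(cows, wl)
--         if maxaval != '':
--             ship.append(maxaval)
--             wl -= cows[maxaval]
--             del cows[maxaval]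
--         else:
--             break
--     return ship
-- ===== SOURCE B (Python) =====
-- def getShip(cows, wl):  # get the ship for one round
--     best, best_w = '', None
--     for name, w in cows.items():
--         if w <= wl and (not best or w > best_w):
--             best, best_w = name, w
--     if not best:
--         return []
--     del cows[best]
--     return [best] + getShip(cows, wl - best_w)
-- ===== Notes on version B (the rewrite author's own statement) =====
-- stated objective: simpler
-- what changed: B is one short recursive function: each round's scan keeps the running favourite as a (name, weight) pair (falsy name = none yet) instead of A's separate getMax helper that compares via repeated dict lookups, and the ship is built by recursion instead of a while-loop accumulator.
import Mathlib
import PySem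

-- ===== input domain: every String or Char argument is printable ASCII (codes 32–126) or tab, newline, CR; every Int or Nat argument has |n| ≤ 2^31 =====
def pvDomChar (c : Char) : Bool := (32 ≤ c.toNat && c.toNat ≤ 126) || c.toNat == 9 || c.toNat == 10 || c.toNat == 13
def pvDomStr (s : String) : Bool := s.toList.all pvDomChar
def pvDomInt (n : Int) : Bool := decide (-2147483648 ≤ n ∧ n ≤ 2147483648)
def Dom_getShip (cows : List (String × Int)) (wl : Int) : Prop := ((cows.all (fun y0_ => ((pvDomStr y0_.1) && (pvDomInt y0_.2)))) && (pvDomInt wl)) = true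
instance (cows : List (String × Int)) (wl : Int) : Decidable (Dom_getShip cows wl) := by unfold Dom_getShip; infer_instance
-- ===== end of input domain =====

-- B replaces A's getMax-helper-plus-while-loop with one recursive function whose round scan
-- keeps the running favourite as a (name, weight) pair — same greedy, a simpler decomposition;
-- both Pythons delete the loaded cows from the dict argument (same mutation), the theorem is
-- about the returned list only.


-- ===== PORT A =====
-- cows[name]: dict lookup = first match in the association list; at every use site below
-- the key is present, so the `none` (KeyError) case is unreachable and defaults to 0.
def pyLook (cows : List (String × Int)) (n : String) : Int :=
  match cows.find? (fun p => p.1 == n) with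
  | some p => p.2
  | none => 0

-- del cows[k]: remove the (unique) entry with key k
def delKey (cows : List (String × Int)) (k : String) : List (String × Int) :=
  cows.eraseP (fun p => p.1 == k)

def getMax (cows : List (String × Int)) (wl : Int) : String :=
  cows.foldl
    (fun cm p =>
      if pyLook cows p.1 ≤ wl then
        if cm == "" || pyLook cows cm < pyLook cows p.1 then p.1 else cm
      else cm)
    ""

-- the while-True loop; each iteration that appends also deletes a key, so the loop runs
-- at most cows.length times: that count is the fuel
def getShipAux : Nat → List (String × Int) → Int → List String
  | 0, _, _ => []
  | n + 1, cows, wl =>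
    let maxaval := getMax cows wl
    if maxaval ≠ "" then
      maxaval :: getShipAux n (delKey cows maxaval) (wl - pyLook cows maxaval)
    else []

def getShip (cows : List (String × Int)) (wl : Int) : List String :=
  getShipAux cows.length cows wl

-- ===== PORT B =====
-- the `for name, w in cows.items()` scan keeping `best, best_w`; Python's best_w starts as
-- None but is only ever read behind `not best` (short-circuit), so it is ported as 0
def pickFold (cows : List (String × Int)) (wl : Int) : String × Int :=
  cows.foldl (fun bw p => if p.2 ≤ wl ∧ (bw.1 = "" ∨ bw.2 < p.2) then p else bw) ("", 0)

-- the recursion; each call that recurses deletes a key, so cows.length is the depth bound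
def getShipAltAux : Nat → List (String × Int) → Int → List String
  | 0, _, _ => []
  | f + 1, cows, wl =>
    let bw := pickFold cows wl
    if bw.1 = "" then []
    else bw.1 :: getShipAltAux f (delKey cows bw.1) (wl - bw.2)

def getShip_alt (cows : List (String × Int)) (wl : Int) : List String :=
  getShipAltAux cows.length cows wl

-- ===== PRECONDITION & SPEC =====
-- Pre_ excludes association lists with duplicate keys, which a Python dict argument
-- cannot represent (the cows parameter is a dict).
def Pre_getShip (cows : List (String × Int)) (_wl : Int) : Prop :=
  (cows.map Prod.fst).Nodup
instance (cows : List (String × Int)) (wl : Int) : Decidable (Pre_getShip cows wl) := by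
  unfold Pre_getShip; infer_instance

def pvWitness_getShip : (List (String × Int)) × Int := ([("a", 3), ("b", 2)], 4)

def Spec_getShip (cows : List (String × Int)) (wl : Int) (out : List String) : Prop :=
  out = getShip_alt cows wl
instance (cows : List (String × Int)) (wl : Int) (out : List String) :
    Decidable (Spec_getShip cows wl out) := by unfold Spec_getShip; infer_instance

-- ===== CLAIM (what is proved, stated in full; the proofs are below) =====
def Claim_equal_getShip : Prop := ∀ (cows : List (String × Int)) (wl : Int), Dom_getShip cows wl → Pre_getShip cows wl → Spec_getShip cows wl (getShip cows wl)

-- ===== LEMMAS AND PROOFS =====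

def keysNodup (cows : List (String × Int)) : Prop := (cows.map Prod.fst).Nodup

theorem pyLook_mem {cows : List (String × Int)} {p : String × Int}
    (hnd : keysNodup cows) (hp : p ∈ cows) : pyLook cows p.1 = p.2 := by
  induction cows with
  | nil => simp at hp
  | cons q t ih =>
    unfold keysNodup at hnd
    simp only [List.map_cons, List.nodup_cons, List.mem_map] at hnd
    rcases List.mem_cons.mp hp with rfl | hp
    · simp [pyLook]
    · have hne : (q.1 == p.1) = false := by
        simp only [beq_eq_false_iff_ne, ne_eq]
        intro h
        exact hnd.1 ⟨p, hp, h.symm⟩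
      have := ih hnd.2 hp
      simp only [pyLook, List.find?_cons, hne] at this ⊢
      exact this

-- A's running name and B's running (name, weight) pair stay in lockstep through the scan
theorem fold_rel (cows : List (String × Int)) (wl : Int) (hnd : keysNodup cows) :
    ∀ (l : List (String × Int)), (∀ x ∈ l, x ∈ cows) →
      ∀ (cm : String) (bw : String × Int),
      bw.1 = cm → (cm ≠ "" → bw.2 = pyLook cows cm) →
      (l.foldl (fun bw p => if p.2 ≤ wl ∧ (bw.1 = "" ∨ bw.2 < p.2) then p else bw) bw).1 =
        l.foldl (fun cm p =>
          if pyLook cows p.1 ≤ wl then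
            if cm == "" || pyLook cows cm < pyLook cows p.1 then p.1 else cm
          else cm) cm ∧
      (l.foldl (fun cm p =>
          if pyLook cows p.1 ≤ wl then
            if cm == "" || pyLook cows cm < pyLook cows p.1 then p.1 else cm
          else cm) cm ≠ "" →
        (l.foldl (fun bw p => if p.2 ≤ wl ∧ (bw.1 = "" ∨ bw.2 < p.2) then p else bw) bw).2 =
          pyLook cows (l.foldl (fun cm p =>
            if pyLook cows p.1 ≤ wl then
              if cm == "" || pyLook cows cm < pyLook cows p.1 then p.1 else cm
            else cm) cm))
  | [], _, cm, bw, h1, h2 => ⟨h1, h2⟩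
  | p :: l, hsub, cm, bw, h1, h2 => by
    have hp : p ∈ cows := hsub p (by simp)
    have hlp : pyLook cows p.1 = p.2 := pyLook_mem hnd hp
    rw [List.foldl_cons, List.foldl_cons]
    have hrec := fold_rel cows wl hnd l (fun x hx => hsub x (by simp [hx]))
    by_cases hfit : p.2 ≤ wl
    · by_cases hcm : cm = ""
      · subst hcm
        rw [hlp]
        rw [if_pos hfit, if_pos ⟨hfit, Or.inl h1⟩]
        simp only [show ("" == "") = true from rfl, Bool.true_or, if_pos]
        exact hrec p.1 p rfl (fun _ => hlp.symm)
      · have hbw := h2 hcm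
        have hcm' : (cm == "") = false := by simpa using hcm
        rw [hlp, if_pos hfit, hcm']
        simp only [Bool.false_or]
        by_cases hlt : pyLook cows cm < p.2
        · have hAa : decide (pyLook cows cm < p.2) = true := by simpa using hlt
          rw [if_pos (show p.2 ≤ wl ∧ (bw.1 = "" ∨ bw.2 < p.2) from
              ⟨hfit, Or.inr (by rw [hbw]; exact hlt)⟩), hAa, if_pos rfl]
          exact hrec p.1 p rfl (fun _ => hlp.symm)
        · have hAa : decide (pyLook cows cm < p.2) = false := by simpa using hlt
          rw [if_neg (show ¬(p.2 ≤ wl ∧ (bw.1 = "" ∨ bw.2 < p.2)) from by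
              rintro ⟨_, hor⟩
              rcases hor with hb | hb
              · exact hcm (h1 ▸ hb)
              · exact hlt (hbw ▸ hb)), hAa, if_neg Bool.false_ne_true]
          exact hrec cm bw h1 h2
    · rw [hlp, if_neg hfit, if_neg (by rintro ⟨hf, _⟩; exact hfit hf)]
      exact hrec cm bw h1 h2

-- when getMax returns a nonempty name it is one of the dict's keys
theorem getMax_mem (cows : List (String × Int)) (wl : Int) :
    getMax cows wl = "" ∨ getMax cows wl ∈ cows.map Prod.fst := by
  have h : ∀ (l : List (String × Int)), (∀ x ∈ l, x ∈ cows) →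
      ∀ cm, (cm = "" ∨ cm ∈ cows.map Prod.fst) →
      (l.foldl (fun cm p =>
        if pyLook cows p.1 ≤ wl then
          if cm == "" || pyLook cows cm < pyLook cows p.1 then p.1 else cm
        else cm) cm = "" ∨
       l.foldl (fun cm p =>
        if pyLook cows p.1 ≤ wl then
          if cm == "" || pyLook cows cm < pyLook cows p.1 then p.1 else cm
        else cm) cm ∈ cows.map Prod.fst) := by
    intro l
    induction l with
    | nil => intro _ cm hcm; exact hcm
    | cons p l ih =>
      intro hsub cm hcm
      rw [List.foldl_cons]
      refine ih (fun x hx => hsub x (by simp [hx])) _ ?_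
      have hpm : p.1 ∈ cows.map Prod.fst := List.mem_map.mpr ⟨p, hsub p (by simp), rfl⟩
      split
      · split
        · exact Or.inr hpm
        · exact hcm
      · exact hcm
  exact h cows (fun _ hx => hx) "" (Or.inl rfl)

theorem map_fst_delKey : ∀ (cows : List (String × Int)) (n : String),
    (delKey cows n).map Prod.fst = (cows.map Prod.fst).erase n
  | [], n => rfl
  | p :: t, n => by
    by_cases hpn : (p.1 == n) = true
    · simp only [delKey, List.eraseP_cons, hpn, cond_true, List.map_cons,
        List.erase_cons]
      simp
    · have ht := map_fst_delKey t n
      simp only [delKey, List.eraseP_cons, hpn, cond_false, List.map_cons,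
        List.erase_cons]
      simpa [delKey] using congrArg (p.1 :: ·) ht

theorem length_delKey {cows : List (String × Int)} {p : String × Int} (hp : p ∈ cows) :
    (delKey cows p.1).length = cows.length - 1 :=
  List.length_eraseP_of_mem hp (by simp)

theorem main_eq : ∀ (f : Nat) (cows : List (String × Int)) (wl : Int),
    cows.length ≤ f → keysNodup cows → getShipAux f cows wl = getShipAltAux f cows wl
  | 0, _, _, _, _ => rfl
  | f + 1, cows, wl, hf, hnd => by
    obtain ⟨hfst, hsnd⟩ := fold_rel cows wl hnd cows (fun _ hx => hx) "" ("", 0) rfl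
      (fun h => absurd rfl h)
    have hpick : (pickFold cows wl).1 = getMax cows wl := hfst
    by_cases hgm : getMax cows wl = ""
    · show (if getMax cows wl ≠ "" then _ else []) = getShipAltAux (f + 1) cows wl
      rw [if_neg (by simpa using hgm)]
      show ([] : List String) =
        (if (pickFold cows wl).1 = "" then []
         else (pickFold cows wl).1 ::
           getShipAltAux f (delKey cows (pickFold cows wl).1) (wl - (pickFold cows wl).2))
      rw [if_pos (by rw [hpick]; exact hgm)]
    · rcases getMax_mem cows wl with h | hmem
      · exact absurd h hgm
      obtain ⟨q, hq, hq1⟩ := List.mem_map.mp hmem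
      show (if getMax cows wl ≠ "" then
          getMax cows wl :: getShipAux f (delKey cows (getMax cows wl))
            (wl - pyLook cows (getMax cows wl))
        else []) = getShipAltAux (f + 1) cows wl
      rw [if_pos (by simpa using hgm)]
      show _ =
        (if (pickFold cows wl).1 = "" then []
         else (pickFold cows wl).1 ::
           getShipAltAux f (delKey cows (pickFold cows wl).1) (wl - (pickFold cows wl).2))
      have hpick2 : (pickFold cows wl).2 = pyLook cows (getMax cows wl) := hsnd hgm
      rw [if_neg (by rw [hpick]; exact hgm), hpick, hpick2]
      congr 1
      have hlen : (delKey cows (getMax cows wl)).length = cows.length - 1 := by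
        rw [← hq1]
        exact length_delKey hq
      have hlenpos : 1 ≤ cows.length := List.length_pos_iff.mpr (by rintro rfl; simp at hq)
      have hnd' : keysNodup (delKey cows (getMax cows wl)) := by
        unfold keysNodup
        rw [map_fst_delKey]
        exact List.Nodup.erase _ hnd
      exact main_eq f _ _ (by omega) hnd'

-- ===== VERDICT (by name: the statement is the Claim_ definition above) =====
theorem getShip_spec : Claim_equal_getShip := by
  intro cows wl _ hPre
  show getShip cows wl = getShip_alt cows wl
  exact main_eq cows.length cows wl le_rfl hPre
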